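-- pv_equiv track=rewrite | github.com/UdarGIT829/Dojo-Admin-Dashboard | compare_discordnames.py | get_levenshtein_matches
-- ===== SOURCE A (Python) =====
-- def get_levenshtein_matches(input_str, string_list):
--     def levenshtein(s1, s2):
--         if len(s1) < len(s2):
--             s1, s2 = s2, s1
--
--         previous_row = list(range(len(s2) + 1))
--         for i, c1 in enumerate(s1):
--             current_row = [i + 1]
--             for j, c2 in enumerate(s2):
--                 insertions = previous_row[j + 1] + 1
--                 deletions = current_row[j] + 1
--                 substitutions = previous_row[j] + (c1 != c2)
--                 current_row.append(min(insertions, deletions, substitutions))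
--             previous_row = current_row
--
--         return previous_row[-1]
--
--     max_distance = len(input_str) // 2
--     result = {}
--
--     for s in string_list:
--         distance = levenshtein(input_str, s)
--         if distance <= max_distance:
--             result.setdefault(distance, []).append(s)
--
--     return result
-- ===== SOURCE B (Python) =====
-- def get_levenshtein_matches(input_str, string_list):
--     # Top-down memoized recursive edit distance over prefix lengths,
--     # instead of A's iterative two-row DP (and without A's swap trick).
--     def dist(a, b):
--         memo = {}
--         def d(i, j):
--             if i == 0:
--                 return j
--             if j == 0:
--                 return i
--             key = (i, j)
--             if key not in memo:
--                 memo[key] = min(d(i - 1, j) + 1,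
--                                 d(i, j - 1) + 1,
--                                 d(i - 1, j - 1) + (a[i - 1] != b[j - 1]))
--             return memo[key]
--         return d(len(a), len(b))
--
--     max_distance = len(input_str) // 2
--     result = {}
--     for s in string_list:
--         dst = dist(input_str, s)
--         if dst <= max_distance:
--             if dst in result:
--                 result[dst].append(s)
--             else:
--                 result[dst] = [s]
--     return result
-- ===== Notes on version B (the rewrite author's own statement) =====
-- stated objective: alternative
-- what changed: Replaces A's iterative two-row bottom-up DP (with the swap-to-longer trick) by a top-down memoized recursive edit distance over prefix lengths, with no swap; the bucketing loop keeps A's grouping order.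
import Mathlib
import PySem

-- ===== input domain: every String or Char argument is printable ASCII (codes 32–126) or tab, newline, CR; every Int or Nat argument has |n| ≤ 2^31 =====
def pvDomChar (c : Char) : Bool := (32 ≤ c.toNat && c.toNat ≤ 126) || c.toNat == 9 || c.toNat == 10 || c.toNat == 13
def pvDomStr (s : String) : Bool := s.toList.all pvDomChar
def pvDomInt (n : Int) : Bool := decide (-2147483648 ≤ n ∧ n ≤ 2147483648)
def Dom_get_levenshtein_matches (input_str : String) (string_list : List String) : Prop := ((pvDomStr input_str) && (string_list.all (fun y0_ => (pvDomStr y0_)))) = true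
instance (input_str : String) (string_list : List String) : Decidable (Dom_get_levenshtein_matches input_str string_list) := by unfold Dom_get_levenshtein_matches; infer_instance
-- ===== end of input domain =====

-- B replaces A's iterative two-row DP (with swap-to-longer) by a top-down recursive
-- edit distance over prefix lengths (memoized in Python; the cache only avoids
-- recomputation, values are identical): an alternative decomposition, same cost.

-- ===== PORT A =====
-- inner helper `levenshtein` of A: swap so s1 is the longer, then two-row DP
def pvLevACore (s1 s2 : List Char) : Int :=
  let previous_row :=
    (PySem.List.enumerate s1).foldl (fun previous_row ic =>
      (PySem.List.enumerate s2).foldl (fun current_row jc =>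
        let insertions := PySem.List.pyGetD previous_row (jc.1 + 1) 0 + 1
        let deletions := PySem.List.pyGetD current_row jc.1 0 + 1
        let substitutions := PySem.List.pyGetD previous_row jc.1 0 + (if ic.2 ≠ jc.2 then (1 : Int) else 0)
        current_row ++ [min (min insertions deletions) substitutions])
      [ic.1 + 1])
    (PySem.List.pyRange 0 ((s2.length : Int) + 1) 1)
  PySem.List.pyGetD previous_row (-1) 0   -- previous_row[-1]; the row is never empty

def pvLevA (s1 s2 : List Char) : Int :=
  if s1.length < s2.length then pvLevACore s2 s1 else pvLevACore s1 s2

def get_levenshtein_matches (input_str : String) (string_list : List String) : List (Int × List String) :=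
  let max_distance := PySem.Int.floordiv (PySem.Str.len input_str) 2
  let result := string_list.foldl (fun result s =>
      let distance := pvLevA input_str.toList s.toList
      if distance ≤ max_distance then
        result.modify distance [] (· ++ [s])   -- result.setdefault(distance, []).append(s)
      else result)
    PySem.Dict.empty
  result.items

-- ===== PORT B =====
-- B's memoized recursion d(i, j); the memo dict is a pure cache, so the port is the
-- plain recursion over the same prefix lengths with the same case order.
def pvDistB (a b : List Char) (i j : Nat) : Int :=
  match i, j with
  | 0, j => (j : Int)
  | i + 1, 0 => ((i : Int) + 1)
  | i + 1, j + 1 =>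
      min (min (pvDistB a b i (j + 1) + 1) (pvDistB a b (i + 1) j + 1))
          (pvDistB a b i j + (if a.getD i ' ' ≠ b.getD j ' ' then (1 : Int) else 0))
  termination_by (i, j)

def get_levenshtein_matches_alt (input_str : String) (string_list : List String) : List (Int × List String) :=
  let max_distance := PySem.Int.floordiv (PySem.Str.len input_str) 2
  let result := string_list.foldl (fun result s =>
      let dst := pvDistB input_str.toList s.toList input_str.toList.length s.toList.length
      if dst ≤ max_distance then
        if result.contains dst then result.insert dst ((result.get? dst).getD [] ++ [s])
        else result.insert dst [s]
      else result)
    PySem.Dict.empty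
  result.items

-- ===== PRECONDITION & SPEC =====
def Spec_get_levenshtein_matches (input_str : String) (string_list : List String) (out : List (Int × List String)) : Prop := out = get_levenshtein_matches_alt input_str string_list
instance (input_str : String) (string_list : List String) (out : List (Int × List String)) : Decidable (Spec_get_levenshtein_matches input_str string_list out) := by unfold Spec_get_levenshtein_matches; infer_instance

-- ===== CLAIM (what is proved, stated in full; the proofs are below) =====
def Claim_equal_get_levenshtein_matches : Prop := ∀ (input_str : String) (string_list : List String), Dom_get_levenshtein_matches input_str string_list → Spec_get_levenshtein_matches input_str string_list (get_levenshtein_matches input_str string_list)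

-- ===== LEMMAS AND PROOFS =====

theorem pvDistB_zero_right (a b : List Char) (i : Nat) : pvDistB a b i 0 = (i : Int) := by
  cases i <;> simp [pvDistB]

theorem pvDistB_symm_aux (a b : List Char) : ∀ (n i j : Nat), i + j ≤ n → pvDistB a b i j = pvDistB b a j i := by
  intro n
  induction n with
  | zero =>
    intro i j h
    obtain ⟨rfl, rfl⟩ : i = 0 ∧ j = 0 := by omega
    simp [pvDistB]
  | succ n ih =>
    intro i j h
    match i, j with
    | 0, j => simp [pvDistB, pvDistB_zero_right]
    | i + 1, 0 => simp [pvDistB, pvDistB_zero_right]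
    | i + 1, j + 1 =>
      have h1 : i + (j + 1) ≤ n := by omega
      have h2 : (i + 1) + j ≤ n := by omega
      have h3 : i + j ≤ n := by omega
      rw [show pvDistB a b (i+1) (j+1) =
            min (min (pvDistB a b i (j + 1) + 1) (pvDistB a b (i + 1) j + 1))
              (pvDistB a b i j + (if a.getD i ' ' ≠ b.getD j ' ' then (1 : Int) else 0)) from by
            simp [pvDistB],
          show pvDistB b a (j+1) (i+1) =
            min (min (pvDistB b a j (i + 1) + 1) (pvDistB b a (j + 1) i + 1))
              (pvDistB b a j i + (if b.getD j ' ' ≠ a.getD i ' ' then (1 : Int) else 0)) from by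
            simp [pvDistB]]
      rw [ih i (j+1) h1, ih (i+1) j h2, ih i j h3]
      rw [min_comm (pvDistB b a (j+1) i + 1)]
      congr 1
      by_cases hc : a.getD i ' ' = b.getD j ' ' <;> simp [Ne, eq_comm]

theorem pvDistB_symm (a b : List Char) (i j : Nat) : pvDistB a b i j = pvDistB b a j i :=
  pvDistB_symm_aux a b (i + j) i j le_rfl

-- the j-th entry of the DP row data
def pvRow (p q : List Char) (i : Nat) : List Int :=
  (List.range (q.length + 1)).map (fun j => pvDistB p q i j)

theorem getD_map_range (f : Nat → Int) (n k : Nat) (hk : k < n) :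
    ((List.range n).map f).getD k 0 = f k := by
  rw [List.getD_eq_getElem?_getD]
  simp [hk]

theorem pyGetD_row_nat (f : Nat → Int) (n k : Nat) (hk : k < n) :
    PySem.List.pyGetD ((List.range n).map f) (k : Int) 0 = f k := by
  rw [PySem.List.pyGetD_natCast, getD_map_range f n k hk]

-- inner loop invariant: folding A's inner step over the suffix of s2 from j0 extends
-- the partial row of d(i+1, ·) to the full row, given previous_row = row of d(i, ·)
theorem pvInner (p q : List Char) (i : Nat) (c1 : Char) (h1 : c1 = p.getD i ' ') :
    ∀ (t : List Char) (j0 : Nat), t = q.drop j0 → j0 ≤ q.length →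
    (PySem.List.enumerate t (j0 : Int)).foldl (fun current_row jc =>
        let insertions := PySem.List.pyGetD (pvRow p q i) (jc.1 + 1) 0 + 1
        let deletions := PySem.List.pyGetD current_row jc.1 0 + 1
        let substitutions := PySem.List.pyGetD (pvRow p q i) jc.1 0 + (if c1 ≠ jc.2 then (1 : Int) else 0)
        current_row ++ [min (min insertions deletions) substitutions])
      ((List.range (j0 + 1)).map (fun j => pvDistB p q (i + 1) j))
    = pvRow p q (i + 1) := by
  intro t
  induction t with
  | nil =>
    intro j0 ht hle
    have : j0 = q.length := by
      have := congrArg List.length ht; simp at this; omega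
    subst this
    simp [PySem.List.enumerate_nil, pvRow]
  | cons c t' ih =>
    intro j0 ht hle
    have hlen : j0 < q.length := by
      have := congrArg List.length ht; simp at this; omega
    have hc : q.getD j0 ' ' = c := by
      have : (q.drop j0).getD 0 ' ' = c := by rw [← ht]; rfl
      rwa [List.getD_eq_getElem?_getD, List.getElem?_drop, Nat.add_zero,
        ← List.getD_eq_getElem?_getD] at this
    have ht' : t' = q.drop (j0 + 1) := by
      have := congrArg (List.drop 1) ht
      simpa [List.drop_drop, Nat.add_comm] using this
    rw [PySem.List.enumerate_cons, List.foldl_cons]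
    have hstep :
        ((List.range (j0 + 1)).map (fun j => pvDistB p q (i + 1) j)) ++
          [min (min (PySem.List.pyGetD (pvRow p q i) ((j0 : Int) + 1) 0 + 1)
                    (PySem.List.pyGetD ((List.range (j0 + 1)).map (fun j => pvDistB p q (i + 1) j)) (j0 : Int) 0 + 1))
               (PySem.List.pyGetD (pvRow p q i) (j0 : Int) 0 + (if c1 ≠ c then (1 : Int) else 0))]
        = (List.range (j0 + 1 + 1)).map (fun j => pvDistB p q (i + 1) j) := by
      have e1 : PySem.List.pyGetD (pvRow p q i) ((j0 : Int) + 1) 0 = pvDistB p q i (j0 + 1) := by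
        rw [show ((j0 : Int) + 1) = ((j0 + 1 : Nat) : Int) by push_cast; ring]
        exact pyGetD_row_nat _ _ _ (by omega)
      have e2 : PySem.List.pyGetD ((List.range (j0 + 1)).map (fun j => pvDistB p q (i + 1) j)) (j0 : Int) 0
          = pvDistB p q (i + 1) j0 := pyGetD_row_nat _ _ _ (by omega)
      have e3 : PySem.List.pyGetD (pvRow p q i) (j0 : Int) 0 = pvDistB p q i j0 :=
        pyGetD_row_nat _ _ _ (by omega)
      rw [e1, e2, e3, List.range_succ (n := j0 + 1), List.map_append]
      congr 1
      simp only [List.map_cons, List.map_nil, List.cons.injEq, and_true]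
      rw [show pvDistB p q (i+1) (j0+1) =
            min (min (pvDistB p q i (j0 + 1) + 1) (pvDistB p q (i + 1) j0 + 1))
              (pvDistB p q i j0 + (if p.getD i ' ' ≠ q.getD j0 ' ' then (1 : Int) else 0)) from by
            simp [pvDistB]]
      rw [h1, hc]
    simp only at hstep ⊢
    rw [hstep]
    have := ih (j0 + 1) ht' (by omega)
    rw [show ((j0 : Int) + 1) = ((j0 + 1 : Nat) : Int) by push_cast; ring]
    exact this

-- outer loop invariant
theorem pvOuter (p q : List Char) :
    ∀ (t : List Char) (i0 : Nat), t = p.drop i0 → i0 ≤ p.length →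
    (PySem.List.enumerate t (i0 : Int)).foldl (fun previous_row ic =>
        (PySem.List.enumerate q).foldl (fun current_row jc =>
          let insertions := PySem.List.pyGetD previous_row (jc.1 + 1) 0 + 1
          let deletions := PySem.List.pyGetD current_row jc.1 0 + 1
          let substitutions := PySem.List.pyGetD previous_row jc.1 0 + (if ic.2 ≠ jc.2 then (1 : Int) else 0)
          current_row ++ [min (min insertions deletions) substitutions])
        [ic.1 + 1])
      (pvRow p q i0)
    = pvRow p q p.length := by
  intro t
  induction t with
  | nil =>
    intro i0 ht hle
    have : i0 = p.length := by
      have := congrArg List.length ht; simp at this; omega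
    subst this
    simp [PySem.List.enumerate_nil]
  | cons c t' ih =>
    intro i0 ht hle
    have hlen : i0 < p.length := by
      have := congrArg List.length ht; simp at this; omega
    have hc : p.getD i0 ' ' = c := by
      have : (p.drop i0).getD 0 ' ' = c := by rw [← ht]; rfl
      rwa [List.getD_eq_getElem?_getD, List.getElem?_drop, Nat.add_zero,
        ← List.getD_eq_getElem?_getD] at this
    have ht' : t' = p.drop (i0 + 1) := by
      have := congrArg (List.drop 1) ht
      simpa [List.drop_drop, Nat.add_comm] using this
    rw [PySem.List.enumerate_cons, List.foldl_cons]
    have hinit : [((i0 : Int) + 1)] = (List.range (0 + 1)).map (fun j => pvDistB p q (i0 + 1) j) := by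
      simp [List.range_succ, pvDistB]
    have hstep := pvInner p q i0 c (by rw [hc]) q 0 (by simp) (by omega)
    simp only [Nat.cast_zero] at hstep
    simp only
    rw [hinit, hstep]
    have := ih (i0 + 1) ht' (by omega)
    rw [show ((i0 : Int) + 1) = ((i0 + 1 : Nat) : Int) by push_cast; ring]
    exact this

theorem pvLevACore_eq (p q : List Char) : pvLevACore p q = pvDistB p q p.length q.length := by
  unfold pvLevACore
  have hinit : PySem.List.pyRange 0 ((q.length : Int) + 1) 1 = pvRow p q 0 := by
    rw [PySem.List.pyRange_one]
    unfold pvRow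
    simp only [sub_zero]
    rw [show (((q.length : Int) + 1)).toNat = q.length + 1 by omega]
    apply List.map_congr_left
    intro k hk
    simp [pvDistB]
  rw [hinit]
  have h := pvOuter p q p 0 (by simp) (by omega)
  simp only [Nat.cast_zero] at h
  rw [h]
  unfold pvRow
  rw [List.range_succ, List.map_append, List.map_cons, List.map_nil,
    PySem.List.pyGetD_neg_one_append_singleton]

theorem pvLevA_eq (x y : List Char) : pvLevA x y = pvDistB x y x.length y.length := by
  unfold pvLevA
  split
  · rw [pvLevACore_eq, pvDistB_symm]
  · rw [pvLevACore_eq]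

-- A's setdefault/append step equals B's contains/insert step on any dict
theorem pvDict_step (d : PySem.Dict Int (List String)) (k : Int) (s : String) :
    d.modify k [] (· ++ [s]) =
      if d.contains k then d.insert k ((d.get? k).getD [] ++ [s]) else d.insert k [s] := by
  unfold PySem.Dict.modify PySem.Dict.getD
  split
  · rfl
  · rename_i h
    have hn : d.get? k = none := by
      cases hg : d.get? k with
      | none => rfl
      | some v => exact absurd (by rw [PySem.Dict.contains_eq_isSome_get?, hg]; rfl) h
    simp [hn]

-- ===== VERDICT (by name: the statement is the Claim_ definition above) =====
theorem get_levenshtein_matches_spec : Claim_equal_get_levenshtein_matches := by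
  intro input_str string_list _
  unfold Spec_get_levenshtein_matches get_levenshtein_matches get_levenshtein_matches_alt
  simp only
  congr 2
  funext result s
  rw [pvLevA_eq]
  split
  · exact pvDict_step result _ s
  · rfl
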